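-- pv_equiv track=rewrite | github.com/AD7ZJ/AoC_2025 | Day4/puzzle2.py | HarvestPaper
-- ===== SOURCE A (Python) =====
-- def CalcNumberOfAdjoining(matrix, x, y) -> int:
--     numAdjoining = 0
--     h, w = len(matrix), len(matrix[0])
--     steps = [
--         (-1,-1), (0,-1), (1,-1),
--         (-1, 0),         (1, 0),
--         (-1, 1), (0, 1), (1, 1)
--     ]
--
--     for dx, dy in steps:
--         ax = x + dx
--         ay = y + dy
--         if 0 <= ax < w and 0 <= ay < h:
--             if matrix[ay][ax] == "@":
--                 numAdjoining += 1
--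
--     return numAdjoining
--
-- def HarvestPaper(matrix):
--     outputMatrix = []
--     accum = 0
--     for y in range(len(matrix)):
--         row = ""
--         for x in range(len(matrix[0])):
--             if matrix[y][x] == '@':
--                 if CalcNumberOfAdjoining(matrix, x, y) < 4:
--                     row += '.'
--                     accum += 1
--                 else:
--                     row += matrix[y][x]
--             else:
--                 row += matrix[y][x]
--         outputMatrix.append(list(row))
--
--     return outputMatrix, accum
-- ===== SOURCE B (Python) =====
-- def HarvestPaper(matrix):
--     h = len(matrix)
--     if h == 0:
--         return [], 0
--     w = len(matrix[0])
--     at = [[1 if matrix[y][x] == '@' else 0 for x in range(w)] for y in range(h)]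
--     hs = [[(row[x - 1] if x > 0 else 0) + row[x] + (row[x + 1] if x + 1 < w else 0)
--            for x in range(w)] for row in at]
--     zero = [0] * w
--     out = []
--     removed = 0
--     for y in range(h):
--         above = hs[y - 1] if y > 0 else zero
--         mid = hs[y]
--         below = hs[y + 1] if y + 1 < h else zero
--         newrow = []
--         for x in range(w):
--             if at[y][x] and above[x] + mid[x] + below[x] - 1 < 4:
--                 newrow.append('.')
--                 removed += 1
--             else:
--                 newrow.extend(matrix[y][x])
--         out.append(newrow)
--     return out, removed
-- ===== Notes on version B (the rewrite author's own statement) =====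
-- stated objective: alternative
-- what changed: B replaces A's per-cell scan of the 8-offset list (a helper call per '@') by a separable two-pass scheme: one precomputed grid of horizontal triple sums, from which each cell's neighbor count is three row lookups minus the cell itself, then a single emit pass.
import Mathlib
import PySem

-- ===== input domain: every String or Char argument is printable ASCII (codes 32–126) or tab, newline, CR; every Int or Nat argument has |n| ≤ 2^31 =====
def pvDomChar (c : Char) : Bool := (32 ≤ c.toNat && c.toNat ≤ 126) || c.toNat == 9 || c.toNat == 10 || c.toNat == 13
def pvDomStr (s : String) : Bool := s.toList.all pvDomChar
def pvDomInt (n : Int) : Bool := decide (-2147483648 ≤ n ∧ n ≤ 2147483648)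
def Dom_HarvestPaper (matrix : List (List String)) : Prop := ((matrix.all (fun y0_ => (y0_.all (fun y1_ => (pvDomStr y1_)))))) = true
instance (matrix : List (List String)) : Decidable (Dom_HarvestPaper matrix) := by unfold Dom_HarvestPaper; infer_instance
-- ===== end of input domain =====

-- B computes neighbor counts by a separable scheme (precomputed horizontal triple sums, then
-- three row lookups per cell) instead of A's per-cell scan of the 8-offset list.

-- ===== PORT A =====
-- 1-char strings from list(row)
def pvConv (c : Char) : String := String.ofList [c]

def pvSteps : List (Int × Int) := [(-1,-1),(0,-1),(1,-1),(-1,0),(1,0),(-1,1),(0,1),(1,1)]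

-- the bounds guard precedes the lookup, so Nat getD after .toNat is exact for Python's matrix[ay][ax]
def CalcNumberOfAdjoining (matrix : List (List String)) (x y : Int) : Int :=
  pvSteps.foldl (fun numAdjoining d =>
    if 0 ≤ x + d.1 ∧ x + d.1 < ((matrix.headD []).length : Int) ∧
       0 ≤ y + d.2 ∧ y + d.2 < ((matrix.length : Int)) then
      if ((matrix.getD (y + d.2).toNat []).getD (x + d.1).toNat "") == "@" then numAdjoining + 1
      else numAdjoining
    else numAdjoining) 0

-- the inner loop body of A; under Pre_ the getD defaults are never used (loop indices are in range)
def pvStepA (matrix : List (List String)) (y : Nat) (rs : List Char × Int) (x : Nat) : List Char × Int :=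
  if ((matrix.getD y []).getD x "") == "@" then
    if CalcNumberOfAdjoining matrix (x : Int) (y : Int) < 4 then (rs.1 ++ ['.'], rs.2 + 1)
    else (rs.1 ++ ((matrix.getD y []).getD x "").toList, rs.2)
  else (rs.1 ++ ((matrix.getD y []).getD x "").toList, rs.2)

def HarvestPaper (matrix : List (List String)) : List (List String) × Int :=
  (List.range matrix.length).foldl (fun st y =>
    let inner := (List.range (matrix.headD []).length).foldl (pvStepA matrix y) ([], st.2)
    (st.1 ++ [inner.1.map pvConv], inner.2)) ([], 0)

-- ===== PORT B =====
-- at[y][x] : 1 iff the cell is "@"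
def pvAtGrid (matrix : List (List String)) : List (List Int) :=
  (List.range matrix.length).map (fun y => (List.range (matrix.headD []).length).map (fun x =>
    if ((matrix.getD y []).getD x "") == "@" then (1:Int) else 0))

-- horizontal triple sums of one at-row
def pvTriple (w : Nat) (row : List Int) : List Int :=
  (List.range w).map (fun x =>
    (if 0 < x then row.getD (x-1) 0 else 0) + row.getD x 0 + (if x+1 < w then row.getD (x+1) 0 else 0))

def pvHsGrid (matrix : List (List String)) : List (List Int) :=
  (pvAtGrid matrix).map (pvTriple (matrix.headD []).length)

-- inner loop body of B
def pvStepB (matrix : List (List String)) (at_ : List (List Int)) (above mid below : List Int)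
    (y : Nat) (rs : List String × Int) (x : Nat) : List String × Int :=
  if ((at_.getD y []).getD x 0 ≠ 0) ∧ above.getD x 0 + mid.getD x 0 + below.getD x 0 - 1 < 4
  then (rs.1 ++ ["."], rs.2 + 1)
  else (rs.1 ++ ((matrix.getD y []).getD x "").toList.map pvConv, rs.2)

def HarvestPaper_alt (matrix : List (List String)) : List (List String) × Int :=
  if matrix.length = 0 then ([], 0) else
  (List.range matrix.length).foldl (fun st y =>
    let zero : List Int := List.replicate (matrix.headD []).length 0
    let inner := (List.range (matrix.headD []).length).foldl
      (pvStepB matrix (pvAtGrid matrix)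
        (if 0 < y then (pvHsGrid matrix).getD (y-1) zero else zero)
        ((pvHsGrid matrix).getD y zero)
        (if y+1 < matrix.length then (pvHsGrid matrix).getD (y+1) zero else zero) y) ([], st.2)
    (st.1 ++ [inner.1], inner.2)) ([], 0)

-- ===== PRECONDITION & SPEC =====
-- Pre_ excludes exactly the inputs where Python A raises IndexError: a row shorter than row 0
-- (A reads matrix[y][x] for every x < len(matrix[0])).
def Pre_HarvestPaper (matrix : List (List String)) : Prop :=
  ∀ row ∈ matrix, (matrix.headD []).length ≤ row.length
instance (matrix : List (List String)) : Decidable (Pre_HarvestPaper matrix) := by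
  unfold Pre_HarvestPaper; infer_instance

def pvWitness_HarvestPaper : List (List String) := [["@","@"],["@","."]]

def Spec_HarvestPaper (matrix : List (List String)) (out : List (List String) × Int) : Prop := out = HarvestPaper_alt matrix
instance (matrix : List (List String)) (out : List (List String) × Int) : Decidable (Spec_HarvestPaper matrix out) := by unfold Spec_HarvestPaper; infer_instance

-- ===== CLAIM (what is proved, stated in full; the proofs are below) =====
def Claim_equal_HarvestPaper : Prop := ∀ (matrix : List (List String)), Dom_HarvestPaper matrix → Pre_HarvestPaper matrix → Spec_HarvestPaper matrix (HarvestPaper matrix)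

-- ===== LEMMAS AND PROOFS =====

-- indicator of an "@" cell at Nat coordinates
def pvA (m : List (List String)) (y x : Nat) : Int :=
  if ((m.getD y []).getD x "") == "@" then 1 else 0

-- bounds-guarded indicator at Int coordinates (the term contributed by one step of A's scan)
def pvInd (m : List (List String)) (ax ay : Int) : Int :=
  if 0 ≤ ax ∧ ax < ((m.headD []).length : Int) ∧ 0 ≤ ay ∧ ay < ((m.length : Int)) then
    (if ((m.getD ay.toNat []).getD ax.toNat "") == "@" then 1 else 0)
  else 0

lemma step_if (a : Int) (c : Prop) [Decidable c] (b : Bool) :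
    (if c then (if b then a+1 else a) else a)
      = a + (if c then (if b then (1:Int) else 0) else 0) := by
  by_cases hc : c
  · cases b <;> simp [hc]
  · simp [hc]

lemma calc_eq (m : List (List String)) (x y : Int) :
    CalcNumberOfAdjoining m x y
      = pvInd m (x + -1) (y + -1) + pvInd m (x + 0) (y + -1) + pvInd m (x + 1) (y + -1)
      + pvInd m (x + -1) (y + 0) + pvInd m (x + 1) (y + 0)
      + pvInd m (x + -1) (y + 1) + pvInd m (x + 0) (y + 1) + pvInd m (x + 1) (y + 1) := by
  simp only [CalcNumberOfAdjoining, pvSteps, List.foldl, step_if, pvInd]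
  ring

lemma ind_center (m : List (List String)) (x y : Nat)
    (hx : x < (m.headD []).length) (hy : y < m.length) :
    pvInd m (x : Int) (y : Int) = pvA m y x := by
  unfold pvInd pvA
  rw [if_pos (by omega)]
  simp

lemma ind_left (m : List (List String)) (x y : Nat)
    (hx : x < (m.headD []).length) (hy : y < m.length) :
    pvInd m ((x : Int) + -1) (y : Int) = if 0 < x then pvA m y (x-1) else 0 := by
  unfold pvInd pvA
  by_cases h0 : 0 < x
  · rw [if_pos (by omega), if_pos h0]
    have h1 : ((x : Int) + -1).toNat = x - 1 := by omega
    have h2 : ((y : Int)).toNat = y := by omega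
    rw [h1, h2]
  · rw [if_neg (by omega), if_neg h0]

lemma ind_right (m : List (List String)) (x y : Nat)
    (hy : y < m.length) :
    pvInd m ((x : Int) + 1) (y : Int) = if x + 1 < (m.headD []).length then pvA m y (x+1) else 0 := by
  unfold pvInd pvA
  by_cases h0 : x + 1 < (m.headD []).length
  · rw [if_pos (by omega), if_pos h0]
    have h1 : ((x : Int) + 1).toNat = x + 1 := by omega
    have h2 : ((y : Int)).toNat = y := by omega
    rw [h1, h2]
  · rw [if_neg (by omega), if_neg h0]

lemma ind_low (m : List (List String)) (ax ay : Int) (h : ay < 0) : pvInd m ax ay = 0 := by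
  unfold pvInd; rw [if_neg (by omega)]

lemma ind_high (m : List (List String)) (ax ay : Int) (h : ((m.length : Int)) ≤ ay) :
    pvInd m ax ay = 0 := by
  unfold pvInd; rw [if_neg (by omega)]

-- one row of B's triple grid, evaluated
lemma at_row_getD (m : List (List String)) (y x : Nat)
    (hy : y < m.length) (hx : x < (m.headD []).length) :
    ((pvAtGrid m).getD y []).getD x 0 = pvA m y x := by
  unfold pvAtGrid pvA
  rw [PySem.List.getD_map_range _ _ _ _ hy, PySem.List.getD_map_range _ _ _ _ hx]

lemma hs_getD (m : List (List String)) (y : Nat) (hy : y < m.length) (zero : List Int) :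
    (pvHsGrid m).getD y zero
      = pvTriple (m.headD []).length ((List.range (m.headD []).length).map (fun x =>
          if ((m.getD y []).getD x "") == "@" then (1:Int) else 0)) := by
  unfold pvHsGrid pvAtGrid
  rw [List.getD_eq_getElem?_getD, List.getElem?_map, List.getElem?_map,
      List.getElem?_range hy]
  rfl

lemma triple_getD (m : List (List String)) (y x : Nat)
    (hy : y < m.length) (hx : x < (m.headD []).length) (zero : List Int) :
    ((pvHsGrid m).getD y zero).getD x 0
      = (if 0 < x then pvA m y (x-1) else 0) + pvA m y x
        + (if x+1 < (m.headD []).length then pvA m y (x+1) else 0) := by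
  rw [hs_getD m y hy]
  unfold pvTriple
  rw [PySem.List.getD_map_range _ _ _ _ hx]
  have e : ∀ z : Nat, z < (m.headD []).length →
      ((List.range (m.headD []).length).map (fun x =>
        if ((m.getD y []).getD x "") == "@" then (1:Int) else 0)).getD z 0 = pvA m y z := by
    intro z hz
    rw [PySem.List.getD_map_range _ _ _ _ hz]; rfl
  by_cases h0 : 0 < x <;> by_cases h1 : x + 1 < (m.headD []).length <;>
    simp only [h0, h1, if_pos, if_false] <;>
    rw [e x hx] <;>
    first
      | (rw [e (x-1) (by omega), e (x+1) (by omega)])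
      | (rw [e (x-1) (by omega)])
      | (rw [e (x+1) (by omega)])

lemma replicate_getD (w x : Nat) : (List.replicate w (0:Int)).getD x 0 = 0 := by
  rw [List.getD_eq_getElem?_getD]
  by_cases h : x < w
  · simp [h]
  · simp [h]

-- central count identity: B's three-row window minus the cell equals A's 8-neighbor scan
lemma cnt_eq (m : List (List String)) (x y : Nat)
    (hx : x < (m.headD []).length) (hy : y < m.length) :
    (if 0 < y then (pvHsGrid m).getD (y-1) (List.replicate (m.headD []).length 0) else (List.replicate (m.headD []).length 0)).getD x 0
    + ((pvHsGrid m).getD y (List.replicate (m.headD []).length 0)).getD x 0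
    + (if y+1 < m.length then (pvHsGrid m).getD (y+1) (List.replicate (m.headD []).length 0) else (List.replicate (m.headD []).length 0)).getD x 0
    - pvA m y x
      = CalcNumberOfAdjoining m (x : Int) (y : Int) := by
  rw [calc_eq]
  have hx0 : (x : Int) + 0 = (x : Int) := by ring
  have hy0 : (y : Int) + 0 = (y : Int) := by ring
  rw [hx0, hy0]
  rw [triple_getD m y x hy hx]
  -- row y+1
  by_cases hb : y + 1 < m.length
  · rw [if_pos hb, triple_getD m (y+1) x hb hx]
    have e1 : (y : Int) + 1 = ((y+1 : Nat) : Int) := by omega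
    rw [e1, ind_left m x (y+1) hx hb, ind_right m x (y+1) hb, ind_center m x (y+1) hx hb]
    -- row y-1
    by_cases ha : 0 < y
    · rw [if_pos ha, triple_getD m (y-1) x (by omega) hx]
      have e2 : (y : Int) + -1 = ((y-1 : Nat) : Int) := by omega
      rw [e2, ind_left m x (y-1) hx (by omega), ind_right m x (y-1) (by omega),
          ind_center m x (y-1) hx (by omega), ind_left m x y hx hy, ind_right m x y hy]
      ring
    · rw [if_neg ha, replicate_getD]
      have e2 : (y : Int) + -1 = -1 := by omega
      rw [e2, ind_low m _ _ (by omega), ind_low m _ _ (by omega), ind_low m _ _ (by omega),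
          ind_left m x y hx hy, ind_right m x y hy]
      ring
  · rw [if_neg hb, replicate_getD]
    have e1 : ((m.length : Int)) ≤ (y : Int) + 1 := by omega
    rw [ind_high m _ _ e1, ind_high m _ _ e1, ind_high m _ _ e1]
    by_cases ha : 0 < y
    · rw [if_pos ha, triple_getD m (y-1) x (by omega) hx]
      have e2 : (y : Int) + -1 = ((y-1 : Nat) : Int) := by omega
      rw [e2, ind_left m x (y-1) hx (by omega), ind_right m x (y-1) (by omega),
          ind_center m x (y-1) hx (by omega), ind_left m x y hx hy, ind_right m x y hy]
      ring
    · rw [if_neg ha, replicate_getD]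
      have e2 : (y : Int) + -1 = -1 := by omega
      rw [e2, ind_low m _ _ (by omega), ind_low m _ _ (by omega), ind_low m _ _ (by omega),
          ind_left m x y hx hy, ind_right m x y hy]
      ring

lemma conv_dot : pvConv '.' = "." := rfl

-- one inner step: B's state tracks A's state through pvConv
lemma stepB_eq (m : List (List String)) (y x : Nat)
    (hy : y < m.length) (hx : x < (m.headD []).length)
    (rsA : List Char × Int) (rsB : List String × Int)
    (h1 : rsB.1 = rsA.1.map pvConv) (h2 : rsB.2 = rsA.2) :
    pvStepB m (pvAtGrid m)
      (if 0 < y then (pvHsGrid m).getD (y-1) (List.replicate (m.headD []).length 0) else (List.replicate (m.headD []).length 0))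
      ((pvHsGrid m).getD y (List.replicate (m.headD []).length 0))
      (if y+1 < m.length then (pvHsGrid m).getD (y+1) (List.replicate (m.headD []).length 0) else (List.replicate (m.headD []).length 0))
      y rsB x
      = ((pvStepA m y rsA x).1.map pvConv, (pvStepA m y rsA x).2) := by
  unfold pvStepB pvStepA
  rw [at_row_getD m y x hy hx]
  by_cases hc : ((m.getD y []).getD x "") == "@"
  · have hA : pvA m y x = 1 := by unfold pvA; rw [if_pos hc]
    have hcnt := cnt_eq m x y hx hy
    rw [hA] at hcnt
    by_cases h4 : CalcNumberOfAdjoining m (x : Int) (y : Int) < 4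
    · rw [if_pos ⟨by omega, by omega⟩, if_pos hc, if_pos h4]
      simp [h1, h2, conv_dot]
    · rw [if_neg (by rintro ⟨-, hlt⟩; rw [hcnt] at hlt; exact h4 hlt), if_pos hc, if_neg h4]
      simp [h1, h2]
  · have hA : pvA m y x = 0 := by unfold pvA; rw [if_neg hc]
    rw [hA, if_neg (by simp), if_neg hc]
    simp [h1, h2]

-- generic fold-relation preservation
lemma foldl_rel {α σ τ : Type} (R : σ → τ → Prop) (f : σ → α → σ) (g : τ → α → τ) :
    ∀ (l : List α) (a : σ) (b : τ), R a b →
      (∀ s t x, x ∈ l → R s t → R (f s x) (g t x)) →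
      R (l.foldl f a) (l.foldl g b) := by
  intro l
  induction l with
  | nil => intro a b h _; exact h
  | cons hd tl ih =>
    intro a b h hs
    exact ih _ _ (hs a b hd (List.mem_cons_self) h)
      (fun s t x hx => hs s t x (List.mem_cons_of_mem _ hx))

lemma inner_eq (m : List (List String)) (y : Nat) (hy : y < m.length) (n : Int) :
    ((List.range (m.headD []).length).foldl
      (pvStepB m (pvAtGrid m)
        (if 0 < y then (pvHsGrid m).getD (y-1) (List.replicate (m.headD []).length 0) else (List.replicate (m.headD []).length 0))
        ((pvHsGrid m).getD y (List.replicate (m.headD []).length 0))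
        (if y+1 < m.length then (pvHsGrid m).getD (y+1) (List.replicate (m.headD []).length 0) else (List.replicate (m.headD []).length 0))
        y) ([], n))
      = (((List.range (m.headD []).length).foldl (pvStepA m y) ([], n)).1.map pvConv,
         ((List.range (m.headD []).length).foldl (pvStepA m y) ([], n)).2) := by
  have h := foldl_rel
    (fun (s : List Char × Int) (t : List String × Int) => t.1 = s.1.map pvConv ∧ t.2 = s.2)
    (pvStepA m y)
    (pvStepB m (pvAtGrid m)
      (if 0 < y then (pvHsGrid m).getD (y-1) (List.replicate (m.headD []).length 0) else (List.replicate (m.headD []).length 0))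
      ((pvHsGrid m).getD y (List.replicate (m.headD []).length 0))
      (if y+1 < m.length then (pvHsGrid m).getD (y+1) (List.replicate (m.headD []).length 0) else (List.replicate (m.headD []).length 0))
      y)
    (List.range (m.headD []).length) ([], n) ([], n)
    (by constructor <;> rfl)
    (by
      intro s t x hx hst
      rw [stepB_eq m y x hy (List.mem_range.mp hx) s t hst.1 hst.2]
      constructor <;> rfl)
  exact Prod.ext h.1 h.2

-- ===== VERDICT (by name: the statement is the Claim_ definition above) =====
theorem HarvestPaper_spec : Claim_equal_HarvestPaper := by
  intro matrix _ _
  unfold Spec_HarvestPaper HarvestPaper HarvestPaper_alt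
  by_cases h0 : matrix.length = 0
  · rw [if_pos h0, h0]
    simp
  · rw [if_neg h0]
    apply PySem.List.foldl_congr_mem
    intro st y hy
    have hy' : y < matrix.length := List.mem_range.mp hy
    simp only
    rw [inner_eq matrix y hy' st.2]
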